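-- pv_equiv track=rewrite | github.com/anmawxz/compiladores | av2/testebr.py | converter_para_forma_greibach
-- ===== SOURCE A (Python) =====
-- def converter_para_forma_greibach(gramatica):
--     gramatica_greibach = {}
--
--     for nao_terminal, regras in gramatica.items():
--         novas_regras = []
--
--         for regra in regras:
--             prefixo = [simbolo for simbolo in regra if simbolo.isupper()]
--             sufixo = [simbolo for simbolo in regra if not simbolo.isupper()]
--
--             if not prefixo:
--                 prefixo.append('λ')
--
--             novas_regras.append(prefixo + sufixo)
--
--         gramatica_greibach[nao_terminal] = novas_regras
--
--     return gramatica_greibach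
-- ===== SOURCE B (Python) =====
-- def converter_para_forma_greibach(gramatica):
--     def reordenar(regra):
--         ordenada = sorted(regra, key=lambda s: not s.isupper())
--         return ordenada if any(s.isupper() for s in regra) else ['λ'] + ordenada
--     return {nao_terminal: [reordenar(regra) for regra in regras]
--             for nao_terminal, regras in gramatica.items()}
-- ===== Notes on version B (the rewrite author's own statement) =====
-- stated objective: alternative
-- what changed: Per rule, the two filtering comprehensions (uppercase prefix, rest suffix) are replaced by one stable sort with a boolean key that puts uppercase symbols first, plus an any-uppercase check deciding the 'λ' prepend; the result dict is built by a comprehension.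
import Mathlib
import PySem

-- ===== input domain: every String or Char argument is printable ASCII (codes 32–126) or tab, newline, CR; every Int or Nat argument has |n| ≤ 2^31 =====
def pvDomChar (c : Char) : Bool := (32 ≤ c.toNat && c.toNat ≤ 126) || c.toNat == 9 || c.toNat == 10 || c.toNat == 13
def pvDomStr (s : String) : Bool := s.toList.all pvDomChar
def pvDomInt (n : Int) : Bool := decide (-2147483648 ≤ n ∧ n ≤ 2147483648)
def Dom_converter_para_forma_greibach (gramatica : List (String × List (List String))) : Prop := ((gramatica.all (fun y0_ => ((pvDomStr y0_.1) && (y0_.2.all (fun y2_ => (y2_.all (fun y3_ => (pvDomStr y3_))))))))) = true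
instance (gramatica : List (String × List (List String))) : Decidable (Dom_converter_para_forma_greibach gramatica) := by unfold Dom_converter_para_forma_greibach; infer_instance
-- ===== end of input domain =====

-- B replaces A's two filtering comprehensions per rule by one stable sort on a boolean key
-- plus an any-uppercase check (objective: alternative decomposition, same cost).


-- ===== PORT A =====
-- s.isupper(): at least one cased character and no lowercase one (exact on the ASCII domain,
-- where the cased characters are exactly the letters)
def pyIsupper (s : String) : Bool :=
  (s.toList.any PySem.Chars.isupper) && !(s.toList.any PySem.Chars.islower)

def converter_para_forma_greibach (gramatica : List (String × List (List String))) : List (String × List (List String)) :=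
  (gramatica.foldl (fun gramatica_greibach p =>
      let novas_regras := p.2.foldl (fun novas_regras regra =>
        let prefixo := regra.filter (fun simbolo => pyIsupper simbolo)
        let sufixo := regra.filter (fun simbolo => !pyIsupper simbolo)
        let prefixo := if prefixo = [] then prefixo ++ ["λ"] else prefixo
        novas_regras ++ [prefixo ++ sufixo]) []
      gramatica_greibach.insert p.1 novas_regras)
    (PySem.Dict.empty)).items

-- ===== PORT B =====
def reordenar (regra : List String) : List String :=
  let ordenada := PySem.List.sorted regra (fun s => !pyIsupper s) false
  if regra.any (fun s => pyIsupper s) then ordenada else ["λ"] ++ ordenada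

def converter_para_forma_greibach_alt (gramatica : List (String × List (List String))) : List (String × List (List String)) :=
  (gramatica.foldl (fun d p => d.insert p.1 (p.2.map (fun regra => reordenar regra)))
    (PySem.Dict.empty)).items

-- ===== PRECONDITION & SPEC =====
def Spec_converter_para_forma_greibach (gramatica : List (String × List (List String))) (out : List (String × List (List String))) : Prop := out = converter_para_forma_greibach_alt gramatica
instance (gramatica : List (String × List (List String))) (out : List (String × List (List String))) : Decidable (Spec_converter_para_forma_greibach gramatica out) := by unfold Spec_converter_para_forma_greibach; infer_instance

-- ===== CLAIM (what is proved, stated in full; the proofs are below) =====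
def Claim_equal_converter_para_forma_greibach : Prop := ∀ (gramatica : List (String × List (List String))), Dom_converter_para_forma_greibach gramatica → Spec_converter_para_forma_greibach gramatica (converter_para_forma_greibach gramatica)

-- ===== LEMMAS AND PROOFS =====

-- inserting x before the first element the comparison puts after it
theorem insertBy_false_true {α : Type} (before : α → α → Bool) (x : α) (fs ts : List α)
    (hf : ∀ y ∈ fs, before x y = false) (ht : ∀ y ∈ ts, before x y = true) :
    PySem.List.insertBy before x (fs ++ ts) = fs ++ x :: ts := by
  induction fs with
  | nil =>
    cases ts with
    | nil => simp [PySem.List.insertBy]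
    | cons t ts' => simp [PySem.List.insertBy, ht t (by simp)]
  | cons f fs' ih =>
    have h0 : before x f = false := hf f (by simp)
    have ih' := ih (fun y hy => hf y (by simp [hy]))
    simp only [List.cons_append, PySem.List.insertBy, h0, Bool.false_eq_true, if_false, ih']

-- a stable sort on a boolean key is the false-key elements followed by the true-key ones
theorem foldl_insertBy_bool {α : Type} (key : α → Bool) (xs fs ts : List α)
    (hf : ∀ y ∈ fs, key y = false) (ht : ∀ y ∈ ts, key y = true) :
    xs.foldl (fun acc x => PySem.List.insertBy (fun a b => decide (key a < key b)) x acc) (fs ++ ts)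
      = (fs ++ xs.filter (fun x => key x = false)) ++ (ts ++ xs.filter (fun x => key x = true)) := by
  induction xs generalizing fs ts with
  | nil => simp
  | cons x xs ih =>
    simp only [List.foldl_cons]
    cases hx : key x with
    | false =>
      have hins : PySem.List.insertBy (fun a b => decide (key a < key b)) x (fs ++ ts)
          = (fs ++ [x]) ++ ts := by
        rw [insertBy_false_true (fun a b => decide (key a < key b)) x fs ts
              (fun y hy => by simp [hx, hf y hy])
              (fun y hy => by simp [hx, ht y hy])]
        simp
      have hf' : ∀ y ∈ fs ++ [x], key y = false := by
        intro y hy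
        rcases List.mem_append.1 hy with h | h
        · exact hf y h
        · rw [List.mem_singleton.1 h]; exact hx
      rw [hins, ih (fs ++ [x]) ts hf' ht]
      simp [hx]
    | true =>
      have hins : PySem.List.insertBy (fun a b => decide (key a < key b)) x (fs ++ ts)
          = fs ++ (ts ++ [x]) := by
        rw [← List.append_assoc]
        exact PySem.List.insertBy_of_forall_not_before _ x (fs ++ ts) (fun y _ => by simp [hx])
      have ht' : ∀ y ∈ ts ++ [x], key y = true := by
        intro y hy
        rcases List.mem_append.1 hy with h | h
        · exact ht y h
        · rw [List.mem_singleton.1 h]; exact hx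
      rw [hins, ih fs (ts ++ [x]) hf ht']
      simp [hx]

theorem sorted_bool_key {α : Type} (key : α → Bool) (xs : List α) :
    PySem.List.sorted xs key false
      = xs.filter (fun x => key x = false) ++ xs.filter (fun x => key x = true) := by
  have := foldl_insertBy_bool key xs [] [] (by simp) (by simp)
  simpa [PySem.List.sorted_eq_foldl_insertBy] using this

theorem rule_eq (regra : List String) :
    (let prefixo := regra.filter (fun simbolo => pyIsupper simbolo)
     let sufixo := regra.filter (fun simbolo => !pyIsupper simbolo)
     let prefixo := if prefixo = [] then prefixo ++ ["λ"] else prefixo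
     prefixo ++ sufixo) = reordenar regra := by
  simp only [reordenar, sorted_bool_key (fun s => !pyIsupper s) regra]
  have h1 : regra.filter (fun x => decide ((!pyIsupper x) = false))
      = regra.filter (fun simbolo => pyIsupper simbolo) :=
    List.filter_congr (fun x _ => by cases h : pyIsupper x <;> simp)
  have h2 : regra.filter (fun x => decide ((!pyIsupper x) = true))
      = regra.filter (fun simbolo => !pyIsupper simbolo) :=
    List.filter_congr (fun x _ => by cases h : pyIsupper x <;> simp)
  rw [h1, h2]
  by_cases h : regra.filter (fun simbolo => pyIsupper simbolo) = []
  · have hany : regra.any (fun s => pyIsupper s) = false := by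
      rw [List.any_eq_false]
      intro x hx
      simpa using List.filter_eq_nil_iff.1 h x hx
    simp [h, hany]
  · have hany : regra.any (fun s => pyIsupper s) = true := by
      rcases List.ne_nil_iff_exists_cons.1 h with ⟨y, ys, hys⟩
      have hy : y ∈ regra.filter (fun simbolo => pyIsupper simbolo) := by simp [hys]
      rcases List.mem_filter.1 hy with ⟨hmem, hkey⟩
      exact List.any_eq_true.2 ⟨y, hmem, hkey⟩
    simp [h, hany]

theorem novas_eq (regras : List (List String)) (acc : List (List String)) :
    regras.foldl (fun novas_regras regra =>
        let prefixo := regra.filter (fun simbolo => pyIsupper simbolo)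
        let sufixo := regra.filter (fun simbolo => !pyIsupper simbolo)
        let prefixo := if prefixo = [] then prefixo ++ ["λ"] else prefixo
        novas_regras ++ [prefixo ++ sufixo]) acc
      = acc ++ regras.map (fun regra => reordenar regra) := by
  induction regras generalizing acc with
  | nil => simp
  | cons regra regras ih =>
    simp only [List.foldl_cons, List.map_cons]
    rw [ih, rule_eq regra]
    simp

theorem outer_eq (gramatica : List (String × List (List String)))
    (d : PySem.Dict String (List (List String))) :
    gramatica.foldl (fun gramatica_greibach p =>
        let novas_regras := p.2.foldl (fun novas_regras regra =>
          let prefixo := regra.filter (fun simbolo => pyIsupper simbolo)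
          let sufixo := regra.filter (fun simbolo => !pyIsupper simbolo)
          let prefixo := if prefixo = [] then prefixo ++ ["λ"] else prefixo
          novas_regras ++ [prefixo ++ sufixo]) []
        gramatica_greibach.insert p.1 novas_regras) d
      = gramatica.foldl (fun d p => d.insert p.1 (p.2.map (fun regra => reordenar regra))) d := by
  induction gramatica generalizing d with
  | nil => rfl
  | cons p g ih =>
    simp only [List.foldl_cons]
    rw [novas_eq p.2 []]
    simp only [List.nil_append]
    exact ih _

-- ===== VERDICT (by name: the statement is the Claim_ definition above) =====
theorem converter_para_forma_greibach_spec : Claim_equal_converter_para_forma_greibach := by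
  intro gramatica _
  unfold Spec_converter_para_forma_greibach converter_para_forma_greibach converter_para_forma_greibach_alt
  rw [outer_eq]
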